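-- pv_equiv track=rewrite | github.com/Sabacc-Organization/Sabacc-Org | server/alderaanHelpers.py | calcBestVal
-- ===== SOURCE A (Python) =====
-- def calcBestVal(handVals):
--     bestVal = 0
--     for val in handVals:
--             if val == 230:
--                 bestVal = val
--                 break
--
--             elif val == 0 or abs(val) > 23:
--                 # bombOutDexes.append(handVals.index(val))
--                 pass
--
--             elif abs(val) > abs(bestVal):
--                 bestVal = val
--
--             elif abs(val) == abs(bestVal):
--                 if val < bestVal: # aka if this new val is negative and the old one is positive
--                     bestVal = val
--
--     if bestVal == 0:
--         return None
--
--     return bestVal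
-- ===== SOURCE B (Python) =====
-- def calcBestVal(handVals):
--     candidates = [v for v in handVals if v == 230 or (v != 0 and abs(v) <= 23)]
--     if not candidates:
--         return None
--     return max(candidates, key=lambda v: (abs(v), v < 0))
-- ===== Notes on version B (the rewrite author's own statement) =====
-- stated objective: simpler
-- what changed: Replaces the stateful loop with explicit break and four-way branch tie-breaking by a one-line filter of valid values followed by max with the key (abs(v), v < 0), which expresses 'largest absolute value, negative preferred on ties' declaratively (230 wins automatically since |230| exceeds every other valid |v|).
import Mathlib
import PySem

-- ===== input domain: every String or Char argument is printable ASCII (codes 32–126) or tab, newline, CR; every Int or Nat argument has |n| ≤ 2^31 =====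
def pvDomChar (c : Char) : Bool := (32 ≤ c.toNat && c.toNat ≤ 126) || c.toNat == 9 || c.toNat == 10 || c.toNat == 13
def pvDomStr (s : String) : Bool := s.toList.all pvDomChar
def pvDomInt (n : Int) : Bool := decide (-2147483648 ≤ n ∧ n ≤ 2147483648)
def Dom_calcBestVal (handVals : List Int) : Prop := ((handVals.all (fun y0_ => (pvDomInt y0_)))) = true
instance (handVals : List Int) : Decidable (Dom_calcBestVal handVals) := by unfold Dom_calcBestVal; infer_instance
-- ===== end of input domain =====

-- B replaces A's stateful loop (with break and branch tie-breaking) by a filter of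
-- valid values plus max with key (abs v, v < 0); objective: simpler, same O(n) cost.

-- ===== PORT A =====
-- the for-loop of A, threading bestVal; 'break' on 230 returns immediately
def calcBestValLoop : List Int → Int → Int
  | [], bestVal => bestVal
  | val :: rest, bestVal =>
    if val = 230 then val
    else if val = 0 ∨ 23 < |val| then calcBestValLoop rest bestVal
    else if |bestVal| < |val| then calcBestValLoop rest val
    else if |val| = |bestVal| then
      if val < bestVal then calcBestValLoop rest val
      else calcBestValLoop rest bestVal
    else calcBestValLoop rest bestVal

def calcBestVal (handVals : List Int) : Option Int :=
  let bestVal := calcBestValLoop handVals 0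
  if bestVal = 0 then none else some bestVal

-- ===== PORT B =====
def calcBestVal_alt (handVals : List Int) : Option Int :=
  let candidates := handVals.filter (fun v => v == 230 || (v != 0 && decide (|v| ≤ 23)))
  if candidates.isEmpty then none
  else PySem.List.max2? candidates (fun v => |v|) (fun v => decide (v < 0))

-- ===== PRECONDITION & SPEC =====
def Spec_calcBestVal (handVals : List Int) (out : Option Int) : Prop := out = calcBestVal_alt handVals
instance (handVals : List Int) (out : Option Int) : Decidable (Spec_calcBestVal handVals out) := by unfold Spec_calcBestVal; infer_instance

-- ===== CLAIM (what is proved, stated in full; the proofs are below) =====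
def Claim_equal_calcBestVal : Prop := ∀ (handVals : List Int), Dom_calcBestVal handVals → Spec_calcBestVal handVals (calcBestVal handVals)

-- ===== LEMMAS AND PROOFS =====

-- the fold step of PySem.List.max2? specialised to B's keys (abs, negativity)
def pvStep : Option Int → Int → Option Int :=
  fun acc x =>
    match acc with
    | none => some x
    | some m =>
      if (decide (|m| < |x|) || !decide (|x| < |m|) && decide (decide (m < 0) < decide (x < 0))) = true
      then some x else some m

def pvValid (v : Int) : Bool := v == 230 || (v != 0 && decide (|v| ≤ 23))

lemma max2?_eq_foldl_pvStep (xs : List Int) :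
    PySem.List.max2? xs (fun v => |v|) (fun v => decide (v < 0)) = xs.foldl pvStep none := by
  unfold PySem.List.max2? pvStep
  congr 1
  funext acc x
  cases acc <;> rfl

-- once 230 is the accumulator, no valid value displaces it
lemma foldl_pvStep_230 (l : List Int) (h : ∀ x ∈ l, pvValid x = true) :
    l.foldl pvStep (some 230) = some 230 := by
  induction l with
  | nil => rfl
  | cons x t ih =>
    have hx : pvValid x = true := h x (by simp)
    have hstep : pvStep (some 230) x = some 230 := by
      simp only [pvValid, Bool.or_eq_true, Bool.and_eq_true, beq_iff_eq, bne_iff_ne,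
        decide_eq_true_eq] at hx
      have habs : |(230:Int)| = 230 := by norm_num
      simp only [pvStep, habs]
      rcases hx with rfl | ⟨hne, hle⟩
      · simp
      · have h1 : |x| ≤ 23 := hle
        have h2 : ¬ ((230:Int) < |x|) := by omega
        have h3 : |x| < (230:Int) := by omega
        simp [h2, not_lt.mpr (le_of_lt h3)]
        omega
    simp only [List.foldl_cons, hstep]
    exact ih (fun y hy => h y (by simp [hy]))

-- loop invariant: for any accumulator with |best| ≤ 23, A's loop-then-test equals
-- B's fold over the filtered list seeded with best (none when best = 0)
lemma pvLoop_eq (hv : List Int) : ∀ (best : Int), |best| ≤ 23 →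
    (if calcBestValLoop hv best = 0 then none else some (calcBestValLoop hv best))
      = (hv.filter pvValid).foldl pvStep (if best = 0 then none else some best) := by
  induction hv with
  | nil => intro best _; simp [calcBestValLoop]
  | cons v rest ih =>
    intro best hb
    by_cases hv230 : v = 230
    · -- break: the loop returns 230; the fold keeps 230 through the rest
      subst hv230
      have hL : calcBestValLoop (230 :: rest) best = 230 := by
        simp [calcBestValLoop]
      have hfilt : pvValid (230:Int) = true := by simp [pvValid]
      have hstep : pvStep (if best = 0 then none else some best) 230 = some 230 := by
        by_cases h0 : best = 0
        · simp [h0, pvStep]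
        · have hlt : |best| < (230:Int) := lt_of_le_of_lt hb (by norm_num)
          simp [h0, pvStep, hlt]
      rw [hL, List.filter_cons_of_pos hfilt, List.foldl_cons, hstep,
        foldl_pvStep_230 _ (fun x hx => List.of_mem_filter hx)]
      norm_num
    · by_cases hinv : v = 0 ∨ 23 < |v|
      · -- invalid value: both sides skip it
        have hL : calcBestValLoop (v :: rest) best = calcBestValLoop rest best := by
          simp [calcBestValLoop, hv230, hinv]
        have hfilt : pvValid v = false := by
          rcases hinv with rfl | h
          · simp [pvValid]
          · simp [pvValid, hv230, not_le.mpr h]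
        rw [hL, List.filter_cons_of_neg (by simp [hfilt])]
        exact ih best hb
      · push_neg at hinv
        obtain ⟨hvne, hvle⟩ := hinv
        have hfilt : pvValid v = true := by simp [pvValid, hvne, hvle]
        have hnot : ¬ (v = 0 ∨ 23 < |v|) := by push_neg; exact ⟨hvne, hvle⟩
        rw [List.filter_cons_of_pos hfilt, List.foldl_cons]
        by_cases hgt : |best| < |v|
        · -- new strict max: both sides take v
          have hL : calcBestValLoop (v :: rest) best = calcBestValLoop rest v := by
            simp [calcBestValLoop, hv230, hnot, hgt]
          have hstep : pvStep (if best = 0 then none else some best) v = some v := by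
            by_cases h0 : best = 0
            · simp [h0, pvStep]
            · simp [h0, pvStep, hgt]
          rw [hL, hstep, ← if_neg hvne (t := (none : Option Int)) (e := some v)]
          exact ih v hvle
        · have hbne : best ≠ 0 := by
            intro h0
            rw [h0] at hgt
            simp only [abs_zero, not_lt] at hgt
            exact hvne (abs_eq_zero.mp (le_antisymm hgt (abs_nonneg v)))
          by_cases heq : |v| = |best|
          · by_cases hlt : v < best
            · -- equal magnitude, v negative vs best positive: both take v
              have hL : calcBestValLoop (v :: rest) best = calcBestValLoop rest v := by
                show (if v = 230 then v else _) = _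
                rw [if_neg hv230, if_neg hnot, if_neg hgt, if_pos heq, if_pos hlt]
              have hvneg : v < 0 ∧ ¬ best < 0 := by
                rcases abs_cases v with ⟨h1, _⟩ | ⟨h1, h2⟩ <;>
                  rcases abs_cases best with ⟨h3, _⟩ | ⟨h3, h4⟩ <;> omega
              have hstep : pvStep (some best) v = some v := by
                have h1 : ¬ |best| < |v| := by rw [heq]; exact lt_irrefl _
                have h2 : ¬ |v| < |best| := by rw [heq]; exact lt_irrefl _
                simp [pvStep, h1, h2, hvneg.1, hvneg.2]
              rw [hL, if_neg hbne, hstep, ← if_neg hvne (t := (none : Option Int)) (e := some v)]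
              exact ih v hvle
            · -- equal magnitude, not smaller: both keep best
              have hL : calcBestValLoop (v :: rest) best = calcBestValLoop rest best := by
                show (if v = 230 then v else _) = _
                rw [if_neg hv230, if_neg hnot, if_neg hgt, if_pos heq, if_neg hlt]
              have hstep : pvStep (some best) v = some best := by
                have h1 : ¬ |best| < |v| := by rw [heq]; exact lt_irrefl _
                have h2 : ¬ (decide (best < 0) < decide (v < 0)) := by
                  rcases abs_cases v with ⟨ha, _⟩ | ⟨ha, hb2⟩ <;>
                    rcases abs_cases best with ⟨hc, _⟩ | ⟨hc, hd⟩ <;>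
                      simp only [decide_eq_true_eq, Bool.lt_iff, decide_eq_false_iff_not,
                        not_lt] <;> omega
                simp [pvStep, h1, h2]
              rw [hL, if_neg hbne, hstep, ← if_neg hbne (t := (none : Option Int)) (e := some best)]
              exact ih best hb
          · -- smaller magnitude: both keep best
            have hltv : |v| < |best| := lt_of_le_of_ne (not_lt.mp hgt) heq
            have hL : calcBestValLoop (v :: rest) best = calcBestValLoop rest best := by
              simp [calcBestValLoop, hv230, hnot, hgt, heq]
            have hstep : pvStep (some best) v = some best := by
              simp [pvStep, not_lt.mpr (le_of_lt hltv), hltv]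
            rw [hL, if_neg hbne, hstep, ← if_neg hbne (t := (none : Option Int)) (e := some best)]
            exact ih best hb

-- ===== VERDICT (by name: the statement is the Claim_ definition above) =====
theorem calcBestVal_spec : Claim_equal_calcBestVal := by
  intro hv _
  show calcBestVal hv = calcBestVal_alt hv
  have h := pvLoop_eq hv 0 (by norm_num)
  norm_num at h
  simp only [calcBestVal, calcBestVal_alt, max2?_eq_foldl_pvStep]
  have hfe : hv.filter (fun v => v == 230 || (v != 0 && decide (|v| ≤ 23))) = hv.filter pvValid := rfl
  rw [hfe]
  by_cases hemp : hv.filter pvValid = []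
  · rw [h, hemp]
    simp
  · rw [h]
    have hne : (hv.filter pvValid).isEmpty = false := by simp [hemp]
    rw [hne]
    simp
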